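-- pv_equiv track=rewrite | github.com/rodriguezarthur/game_of_life | game_of_life_func.py | enlarge_grid
-- ===== SOURCE A (Python) =====
-- def enlarge_grid(grid):
--     height = len(grid)
--     width = len(grid[0])
--     enlarged_grid = [[0 for i in range(width+2)] for i in range(height+2)]
--     for i in range(height):
--         for j in range(width):
--             enlarged_grid[i+1][j+1] = grid[i][j]
--     return enlarged_grid
-- ===== SOURCE B (Python) =====
-- def enlarge_grid(grid):
--     height = len(grid)
--     width = len(grid[0])
--
--     def transpose(g, n):
--         return [[row[i] for row in g] for i in range(n)]
--
--     cols = transpose(grid, width)                    # width x height, column-major view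
--     cols = [[0] * height] + cols + [[0] * height]    # border columns, added as rows here
--     rows = transpose(cols, height)                   # back to row-major: height x (width+2)
--     return [[0] * (width + 2)] + rows + [[0] * (width + 2)]
-- ===== Notes on version B (the rewrite author's own statement) =====
-- stated objective: alternative
-- what changed: B pads by double transposition: transpose the grid to column-major, prepend/append zero rows (the future border columns), transpose back, then prepend/append the zero border rows - instead of A's preallocated zero buffer overwritten cell-by-cell with nested index assignments.
import Mathlib
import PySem

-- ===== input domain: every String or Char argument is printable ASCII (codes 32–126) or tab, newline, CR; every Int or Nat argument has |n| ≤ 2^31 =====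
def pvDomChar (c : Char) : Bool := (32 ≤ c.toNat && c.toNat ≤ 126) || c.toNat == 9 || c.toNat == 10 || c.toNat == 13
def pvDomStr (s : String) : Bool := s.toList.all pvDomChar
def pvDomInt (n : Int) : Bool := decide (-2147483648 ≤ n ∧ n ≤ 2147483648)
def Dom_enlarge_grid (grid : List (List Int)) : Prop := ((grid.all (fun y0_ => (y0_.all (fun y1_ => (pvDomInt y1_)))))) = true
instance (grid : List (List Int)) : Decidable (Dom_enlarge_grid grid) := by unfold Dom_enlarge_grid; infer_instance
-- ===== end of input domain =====

-- B pads by double transposition (transpose, add zero rows, transpose back, add zero rows)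
-- instead of A's preallocate-and-overwrite buffer (objective: alternative).

-- ===== PORT A =====
-- literal port of A: prefilled (h+2)x(w+2) zero buffer, then nested index-assignment loops over the interior
def enlarge_grid (grid : List (List Int)) : List (List Int) :=
  let height := grid.length
  let width := ((PySem.List.pyGet? grid 0).getD []).length
  let init := (PySem.List.pyRange 0 ((height : Int) + 2) 1).map
      (fun _ => (PySem.List.pyRange 0 ((width : Int) + 2) 1).map (fun _ => (0 : Int)))
  (PySem.List.pyRange 0 (height : Int) 1).foldl (fun acc i =>
    (PySem.List.pyRange 0 (width : Int) 1).foldl (fun acc2 j =>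
      PySem.List.pySetD acc2 (i + 1)
        (PySem.List.pySetD (PySem.List.pyGetD acc2 (i + 1) []) (j + 1)
          (PySem.List.pyGetD (PySem.List.pyGetD grid i []) j 0))) acc) init

-- ===== PORT B =====
-- B's transpose helper: [[row[i] for row in g] for i in range(n)]
def pvTranspose (g : List (List Int)) (n : Int) : List (List Int) :=
  (PySem.List.pyRange 0 n 1).map (fun i => g.map (fun row => PySem.List.pyGetD row i 0))

-- literal port of B: transpose, pad with zero rows (future border columns), transpose back, pad with zero rows
def enlarge_grid_alt (grid : List (List Int)) : List (List Int) :=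
  let height := grid.length
  let width := ((PySem.List.pyGet? grid 0).getD []).length
  let cols := pvTranspose grid (width : Int)
  let cols2 := [List.replicate height (0 : Int)] ++ cols ++ [List.replicate height (0 : Int)]
  let rows := pvTranspose cols2 (height : Int)
  [List.replicate (width + 2) (0 : Int)] ++ rows ++ [List.replicate (width + 2) (0 : Int)]

-- ===== PRECONDITION & SPEC =====
-- Pre_ excludes exactly the inputs on which both Pythons raise IndexError: the empty grid
-- (grid[0] fails) and grids having a row shorter than the first row (row[i] / grid[i][j] fails).
def Pre_enlarge_grid (grid : List (List Int)) : Prop :=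
  grid ≠ [] ∧ ∀ row ∈ grid, (grid.headD []).length ≤ row.length
instance (grid : List (List Int)) : Decidable (Pre_enlarge_grid grid) := by
  unfold Pre_enlarge_grid; infer_instance

def pvWitness_enlarge_grid : List (List Int) := [[1, 2], [3, 4]]

def Spec_enlarge_grid (grid : List (List Int)) (out : List (List Int)) : Prop := out = enlarge_grid_alt grid
instance (grid : List (List Int)) (out : List (List Int)) : Decidable (Spec_enlarge_grid grid out) := by unfold Spec_enlarge_grid; infer_instance

-- ===== CLAIM (what is proved, stated in full; the proofs are below) =====
def Claim_equal_enlarge_grid : Prop := ∀ (grid : List (List Int)), Dom_enlarge_grid grid → Pre_enlarge_grid grid → Spec_enlarge_grid grid (enlarge_grid grid)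

-- ===== LEMMAS AND PROOFS =====

-- generic buffer-overwrite loop: writing slots 1..n of an (n+k+2)-buffer of b's
theorem pv_fold_set_shift {α : Type} (F : Nat → α → α) (d : α) :
    ∀ (n k : Nat) (b : α),
      (List.range n).foldl (fun a i => a.set (i + 1) (F i (a.getD (i + 1) d))) (List.replicate (n + k + 2) b)
        = b :: (List.range n).map (fun i => F i b) ++ List.replicate (k + 1) b := by
  intro n
  induction n with
  | zero => intro k b; simp [List.replicate_succ]
  | succ m ih =>
    intro k b
    rw [List.range_succ, List.foldl_append]
    have h1 : m + 1 + k + 2 = m + (k + 1) + 2 := by omega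
    rw [h1, ih (k + 1) b]
    simp only [List.foldl_cons, List.foldl_nil]
    have hget : (b :: List.map (fun i => F i b) (List.range m) ++ List.replicate (k + 1 + 1) b).getD (m + 1) d = b := by
      rw [show b :: List.map (fun i => F i b) (List.range m) ++ List.replicate (k + 1 + 1) b
            = (b :: List.map (fun i => F i b) (List.range m)) ++ List.replicate (k + 1 + 1) b from rfl,
          List.getD_append_right _ _ _ _ (by simp)]
      simp
    rw [hget,
        show b :: List.map (fun i => F i b) (List.range m) ++ List.replicate (k + 1 + 1) b
          = (b :: List.map (fun i => F i b) (List.range m)) ++ List.replicate (k + 1 + 1) b from rfl,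
        List.set_append_right _ _ (by simp)]
    simp [List.replicate_succ]

-- the row the inner loop produces from a zero row
theorem pv_row0 (w : Nat) (f : Nat → Int) :
    (List.range w).foldl (fun x j => x.set (j + 1) (f j)) (List.replicate (w + 2) 0)
      = 0 :: (List.range w).map f ++ [0] := by
  have h := pv_fold_set_shift (fun j (_ : Int) => f j) 0 w 0 0
  simpa using h

-- the inner loop only touches row I of the buffer
theorem pv_inner_lift (v : Nat → Int) (I : Nat) :
    ∀ (L : List Nat) (g : List (List Int)), I < g.length →
      L.foldl (fun a j => a.set I ((a.getD I []).set (j + 1) (v j))) g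
        = g.set I (L.foldl (fun r j => r.set (j + 1) (v j)) (g.getD I [])) := by
  intro L
  induction L with
  | nil =>
    intro g hI
    rw [List.foldl_nil, List.foldl_nil, List.getD_eq_getElem _ _ hI, List.set_getElem_self]
  | cons j L ih =>
    intro g hI
    simp only [List.foldl_cons]
    rw [ih _ (by simpa using hI), List.set_set]
    congr 2
    rw [List.getD_eq_getElem _ _ (by simpa using hI)]
    simp

-- fold congruence under an invariant, with membership
theorem pv_foldl_congr_inv {α β : Type} (P : α → Prop) (f g : α → β → α) :
    ∀ (L : List β) (a : α), P a → (∀ x b, P x → P (g x b)) →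
      (∀ x b, P x → b ∈ L → f x b = g x b) → L.foldl f a = L.foldl g a := by
  intro L
  induction L with
  | nil => intro a _ _ _; rfl
  | cons b L ih =>
    intro a ha hPg hfg
    simp only [List.foldl_cons]
    rw [hfg a b ha List.mem_cons_self]
    exact ih _ (hPg a b ha) hPg (fun x c hx hc => hfg x c hx (List.mem_cons_of_mem _ hc))

-- a map over indices of xs is a map over xs
theorem pv_map_range_getD {α β : Type} (f : α → β) (d : α) :
    ∀ (xs : List α), (List.range xs.length).map (fun i => f (xs.getD i d)) = xs.map f := by
  intro xs
  induction xs with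
  | nil => simp
  | cons x xs ih =>
    rw [List.length_cons, List.range_succ_eq_map, List.map_cons, List.map_map]
    simpa using congrArg (List.cons (f x)) ih

-- A equals the canonical padded form
theorem pv_mainA (r : List Int) (t : List (List Int)) :
    enlarge_grid (r :: t) =
      List.replicate (r.length + 2) 0 ::
        (r :: t).map (fun row => 0 :: (List.range r.length).map (fun j => row.getD j 0) ++ [0])
        ++ [List.replicate (r.length + 2) 0] := by
  unfold enlarge_grid
  have c1 : ((r :: t).length : Int) + 2 = (((r :: t).length + 2 : Nat) : Int) := by push_cast; ring
  have c2 : ((r.length : Int)) + 2 = ((r.length + 2 : Nat) : Int) := by push_cast; ring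
  have hget0 : (PySem.List.pyGet? (r :: t) 0).getD [] = r := by
    simp [PySem.List.pyGet?, PySem.List.pyIdx?]
  simp only [hget0, c1, c2, PySem.List.pyRange_zero_natCast, List.map_map, List.foldl_map]
  simp only [Function.comp_def, ← Nat.cast_add_one, PySem.List.pySetD_natCast,
    PySem.List.pyGetD_natCast, List.map_const', List.length_range]
  refine Eq.trans (pv_foldl_congr_inv (fun a => a.length = (r :: t).length + 2) _
      (fun acc i => acc.set (i + 1)
        ((List.range r.length).foldl (fun x j => x.set (j + 1) (((r :: t).getD i []).getD j 0))
          (acc.getD (i + 1) [])))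
      _ _ (by simp) (fun x i hx => by simpa using hx)
      (fun x i hx hi => pv_inner_lift (fun j => ((r :: t).getD i []).getD j 0) (i + 1) _ x
        (by rw [hx]; have := List.mem_range.mp hi; omega))) ?_
  refine Eq.trans (pv_fold_set_shift
      (fun i rr => (List.range r.length).foldl (fun x j => x.set (j + 1) (((r :: t).getD i []).getD j 0)) rr)
      [] (r :: t).length 0 (List.replicate (r.length + 2) 0)) ?_
  simp only [pv_row0]
  have hm := pv_map_range_getD
      (fun row => (0 : Int) :: (List.range r.length).map (fun j => row.getD j 0) ++ [(0 : Int)]) [] (r :: t)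
  rw [← hm]
  rfl

-- B equals the same canonical padded form
theorem pv_mainB (r : List Int) (t : List (List Int)) :
    enlarge_grid_alt (r :: t) =
      List.replicate (r.length + 2) 0 ::
        (r :: t).map (fun row => 0 :: (List.range r.length).map (fun j => row.getD j 0) ++ [0])
        ++ [List.replicate (r.length + 2) 0] := by
  unfold enlarge_grid_alt pvTranspose
  have hget0 : (PySem.List.pyGet? (r :: t) 0).getD [] = r := by
    simp [PySem.List.pyGet?, PySem.List.pyIdx?]
  simp only [hget0, PySem.List.pyRange_zero_natCast, List.map_map]
  simp only [Function.comp_def, PySem.List.pyGetD_natCast]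
  have hrow : ∀ i ∈ List.range (r :: t).length,
      (([List.replicate (r :: t).length (0 : Int)]
          ++ (List.range r.length).map (fun j => (r :: t).map (fun row => row.getD j 0))
          ++ [List.replicate (r :: t).length (0 : Int)]).map (fun c => c.getD i 0))
        = (0 : Int) :: (List.range r.length).map (fun j => ((r :: t).getD i []).getD j 0) ++ [0] := by
    intro i hi
    have hlt : i < (r :: t).length := List.mem_range.mp hi
    simp only [List.map_append, List.map_map, Function.comp_def, List.map_cons, List.map_nil]
    have hz : (List.replicate (r :: t).length (0 : Int)).getD i 0 = 0 := by
      rcases Nat.lt_or_ge i (r :: t).length with h | h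
      · rw [List.getD_eq_getElem _ _ (by simpa using h)]; simp
      · rw [List.getD_eq_default _ _ (by simpa using h)]
    rw [hz, List.singleton_append]
    congr 1
    congr 1
    apply List.map_congr_left
    intro j _
    show ((r :: t).map (fun row => row.getD j 0)).getD i 0 = ((r :: t).getD i []).getD j 0
    rw [List.getD_eq_getElem _ _ (by simpa using hlt), List.getElem_map,
        List.getD_eq_getElem _ _ hlt]
  rw [List.map_congr_left hrow,
      pv_map_range_getD (fun row => (0 : Int) :: (List.range r.length).map (fun j => row.getD j 0) ++ [(0 : Int)]) [] (r :: t)]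
  rfl

-- ===== VERDICT (by name: the statement is the Claim_ definition above) =====
theorem enlarge_grid_spec : Claim_equal_enlarge_grid := by
  unfold Claim_equal_enlarge_grid
  intro grid _ hpre
  unfold Spec_enlarge_grid
  obtain ⟨hne, -⟩ := hpre
  cases grid with
  | nil => exact absurd rfl hne
  | cons r t => exact (pv_mainA r t).trans (pv_mainB r t).symm
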